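-- pv_equiv track=rewrite | github.com/Szapt/Calc-Methods | diferencias_divididas.py | organizar_datos
-- ===== SOURCE A (Python) =====
-- def organizar_datos(x_lista, y_lista, diferencias):
--     # Inicializamos una lista de listas para almacenar los datos de la tabla
--     resultados_tabla = []
--
--     # Añadir las dos primeras columnas: xi y f(xi)
--     for i in range(len(x_lista)):
--         fila = [f"{x_lista[i]}", f"{y_lista[i]}"]  # xi, f(xi)
--         resultados_tabla.append(fila)
--
--     # Añadir las diferencias divididas en diagonal
--     for j in range(1, len(diferencias)):
--         for i in range(j, len(diferencias)):
--             resultados_tabla[i].append(f"{diferencias[j][i-j]}")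
--
--     # Rellenar las celdas vacías para la diagonal superior
--     for i in range(len(resultados_tabla)):
--         while len(resultados_tabla[i]) < len(diferencias) + 2:
--             resultados_tabla[i].append("")  # Agregar celdas vacías
--
--     return resultados_tabla
-- ===== SOURCE B (Python) =====
-- def organizar_datos(x_lista, y_lista, diferencias):
--     m = len(diferencias)
--     tabla = []
--     for i in range(len(x_lista)):
--         fila = [f"{x_lista[i]}", f"{y_lista[i]}"]
--         if i < m:
--             fila += [f"{diferencias[j][i - j]}" for j in range(1, i + 1)]
--         fila += [""] * (m + 2 - len(fila))
--         tabla.append(fila)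
--     return tabla
-- ===== Notes on version B (the rewrite author's own statement) =====
-- stated objective: simpler
-- what changed: B builds the table in a single row-major pass (each row gets xi, f(xi), its diagonal difference entries, then padding, all at once) instead of A's three phases: initial columns, column-major diagonal fill by in-place row mutation, and a separate padding loop.
import Mathlib
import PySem

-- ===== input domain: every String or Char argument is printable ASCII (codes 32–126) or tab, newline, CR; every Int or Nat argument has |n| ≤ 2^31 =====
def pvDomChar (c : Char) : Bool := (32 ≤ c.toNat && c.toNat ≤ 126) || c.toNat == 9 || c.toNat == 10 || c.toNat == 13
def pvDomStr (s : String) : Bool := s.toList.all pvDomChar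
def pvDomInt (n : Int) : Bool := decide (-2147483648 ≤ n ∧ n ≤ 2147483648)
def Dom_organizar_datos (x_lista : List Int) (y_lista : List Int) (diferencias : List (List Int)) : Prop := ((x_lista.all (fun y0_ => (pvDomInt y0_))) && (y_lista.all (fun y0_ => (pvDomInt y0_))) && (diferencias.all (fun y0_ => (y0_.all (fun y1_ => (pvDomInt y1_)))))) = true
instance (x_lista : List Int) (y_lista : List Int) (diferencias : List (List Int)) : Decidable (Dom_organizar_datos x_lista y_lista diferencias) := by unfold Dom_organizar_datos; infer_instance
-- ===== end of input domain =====

-- B builds each row in one left-to-right pass (xi, f(xi), its diagonal entries, padding)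
-- instead of A's three phases (initial columns, column-major diagonal fill, padding loop); objective: simpler.

-- the f-string f"{diferencias[j][i-j]}" (indices in range via Pre_; getD is exact there)
def pvDiag (diferencias : List (List Int)) (j i : Nat) : String :=
  PySem.Int.toStr ((diferencias.getD j []).getD (i - j) 0)

-- ===== PORT A =====
-- the `while` padding loop of A, step for step (append "" until the target width is reached)
def pvPadA (fila : List String) (target : Nat) : List String :=
  if _h : fila.length < target then pvPadA (fila ++ [""]) target else fila
termination_by target - fila.length
decreasing_by simp; omega

def organizar_datos (x_lista : List Int) (y_lista : List Int) (diferencias : List (List Int)) : List (List String) :=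
  -- first loop: two initial columns (y_lista[i] in range via Pre_; getD is exact there)
  let t1 : List (List String) :=
    (List.range x_lista.length).map (fun i =>
      [PySem.Int.toStr (x_lista.getD i 0), PySem.Int.toStr (y_lista.getD i 0)])
  -- nested loops: column-major diagonal fill (row index i in range via Pre_; modify is exact there)
  let t2 : List (List String) :=
    (List.range' 1 (diferencias.length - 1)).foldl (fun t j =>
      (List.range' j (diferencias.length - j)).foldl (fun t' i =>
        t'.modify i (fun fila => fila ++ [pvDiag diferencias j i])) t) t1
  -- last loop: pad every row with "" up to width len(diferencias) + 2
  t2.map (fun fila => pvPadA fila (diferencias.length + 2))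

-- ===== PORT B =====
def organizar_datos_alt (x_lista : List Int) (y_lista : List Int) (diferencias : List (List Int)) : List (List String) :=
  (List.range x_lista.length).map (fun i =>
    let fila : List String :=
      [PySem.Int.toStr (x_lista.getD i 0), PySem.Int.toStr (y_lista.getD i 0)] ++
        (if i < diferencias.length then
          (List.range' 1 i).map (fun j => pvDiag diferencias j i)
        else [])
    fila ++ List.replicate (diferencias.length + 2 - fila.length) "")

-- ===== PRECONDITION & SPEC =====
-- Pre_ excludes exactly the inputs where the Python A raises IndexError: y_lista shorter than
-- x_lista, more difference columns than rows, or a difference column too short for its diagonal.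
def Pre_organizar_datos (x_lista : List Int) (y_lista : List Int) (diferencias : List (List Int)) : Prop :=
  x_lista.length ≤ y_lista.length ∧
  (2 ≤ diferencias.length → diferencias.length ≤ x_lista.length) ∧
  (∀ j < diferencias.length, 1 ≤ j → diferencias.length - j ≤ (diferencias.getD j []).length)
instance (x_lista : List Int) (y_lista : List Int) (diferencias : List (List Int)) : Decidable (Pre_organizar_datos x_lista y_lista diferencias) := by unfold Pre_organizar_datos; infer_instance

def pvWitness_organizar_datos : List Int × List Int × List (List Int) :=
  ([1, 2, 3], [1, 4, 9], [[1, 4, 9], [3, 5], [6]])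

def Spec_organizar_datos (x_lista : List Int) (y_lista : List Int) (diferencias : List (List Int)) (out : List (List String)) : Prop := out = organizar_datos_alt x_lista y_lista diferencias
instance (x_lista : List Int) (y_lista : List Int) (diferencias : List (List Int)) (out : List (List String)) : Decidable (Spec_organizar_datos x_lista y_lista diferencias out) := by unfold Spec_organizar_datos; infer_instance

-- ===== CLAIM (what is proved, stated in full; the proofs are below) =====
def Claim_equal_organizar_datos : Prop := ∀ (x_lista : List Int) (y_lista : List Int) (diferencias : List (List Int)), Dom_organizar_datos x_lista y_lista diferencias → Pre_organizar_datos x_lista y_lista diferencias → Spec_organizar_datos x_lista y_lista diferencias (organizar_datos x_lista y_lista diferencias)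

-- ===== LEMMAS AND PROOFS =====

-- A's while-padding equals appending the right number of "" cells
lemma pvPadA_eq (target : Nat) : ∀ (fila : List String),
    pvPadA fila target = fila ++ List.replicate (target - fila.length) "" := by
  intro fila
  by_cases h : fila.length < target
  · rw [pvPadA, dif_pos h, pvPadA_eq target (fila ++ [""])]
    have : target - fila.length = (target - (fila.length + 1)) + 1 := by omega
    simp [this, List.replicate_succ, List.append_assoc]
  · rw [pvPadA, dif_neg h]
    have : target - fila.length = 0 := by omega
    simp [this]
termination_by fila => target - fila.length
decreasing_by simp; omega

-- one inner pass: each row index in [s, s+k) is modified exactly once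
lemma fold_modify_get (h : Nat → String) :
    ∀ (k s : Nat) (t : List (List String)) (i : Nat),
    ((List.range' s k).foldl (fun t' i' => t'.modify i' (fun r => r ++ [h i'])) t)[i]? =
      if s ≤ i ∧ i < s + k then t[i]?.map (fun r => r ++ [h i]) else t[i]? := by
  intro k
  induction k with
  | zero =>
    intro s t i
    simp only [List.range'_zero, List.foldl_nil]
    rw [if_neg (by omega)]
  | succ k ih =>
    intro s t i
    rw [List.range'_succ, List.foldl_cons, ih]
    rw [List.getElem?_modify]
    by_cases hsi : s = i
    · rw [if_neg (by omega), if_pos (by omega)]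
      cases t[i]? <;> simp [hsi]
    · by_cases hk : s + 1 ≤ i ∧ i < s + 1 + k
      · rw [if_pos hk, if_pos (by omega)]
        cases t[i]? <;> simp [hsi]
      · rw [if_neg hk, if_neg (by omega)]
        cases t[i]? <;> simp [hsi]

-- the whole column-major double loop, seen row-wise
lemma fold_outer_get (g : Nat → Nat → String) (m : Nat) :
    ∀ (k s : Nat) (t : List (List String)) (i : Nat), s + k ≤ m →
    ((List.range' s k).foldl (fun t2 j =>
        (List.range' j (m - j)).foldl (fun t' i' =>
          t'.modify i' (fun r => r ++ [g j i'])) t2) t)[i]? =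
      t[i]?.map (fun r => r ++
        (((List.range' s k).filter (fun j => decide (j ≤ i) && decide (i < m))).map
          (fun j => g j i))) := by
  intro k
  induction k with
  | zero =>
    intro s t i _
    simp
  | succ k ih =>
    intro s t i hsk
    rw [List.range'_succ, List.foldl_cons, ih _ _ _ (by omega)]
    rw [fold_modify_get (g s)]
    rw [List.filter_cons]
    by_cases hc : s ≤ i ∧ i < m
    · rw [if_pos (by omega : s ≤ i ∧ i < s + (m - s))]
      have hb : (decide (s ≤ i) && decide (i < m)) = true := by simp [hc.1, hc.2]
      rw [hb]
      cases t[i]? <;> simp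
    · rw [if_neg (by omega : ¬ (s ≤ i ∧ i < s + (m - s)))]
      have hb : (decide (s ≤ i) && decide (i < m)) = false := by
        simp only [Bool.and_eq_false_iff, decide_eq_false_iff_not]
        omega
      rw [hb]
      simp

lemma filter_range'_le (i : Nat) (p : Nat → Bool) (hp : ∀ j, p j = decide (j ≤ i)) :
    ∀ (k s : Nat), i < s + k → s ≤ i + 1 →
    (List.range' s k).filter p = List.range' s (i + 1 - s) := by
  intro k
  induction k with
  | zero =>
    intro s h1 h2
    rw [(by omega : i + 1 - s = 0)]
    simp
  | succ k ih =>
    intro s h1 h2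
    rw [List.range'_succ, List.filter_cons, hp s]
    by_cases hs : s ≤ i
    · rw [decide_eq_true hs, ih _ (by omega) (by omega)]
      rw [(by omega : i + 1 - s = (i + 1 - (s + 1)) + 1), List.range'_succ]
      simp
    · rw [decide_eq_false (by omega)]
      have hnil : ∀ (k' s' : Nat), i < s' → (List.range' s' k').filter p = [] := by
        intro k'
        induction k' with
        | zero => intro s' _; simp
        | succ k' ih' =>
          intro s' hs'
          rw [List.range'_succ, List.filter_cons, hp s', decide_eq_false (by omega),
            ih' _ (by omega)]
          simp
      rw [hnil _ _ (by omega), (by omega : i + 1 - s = 0)]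
      simp
lemma range_getElem?_none {n i : Nat} (h : ¬ i < n) : (List.range n)[i]? = none := by
  rw [List.getElem?_eq_none]
  simpa using by omega

-- ===== VERDICT (by name: the statement is the Claim_ definition above) =====
theorem organizar_datos_spec : Claim_equal_organizar_datos := by
  intro x y dif _ _
  unfold Spec_organizar_datos
  show organizar_datos x y dif = organizar_datos_alt x y dif
  unfold organizar_datos organizar_datos_alt
  apply List.ext_getElem?
  intro i
  rw [List.getElem?_map, List.getElem?_map]
  rcases Nat.eq_zero_or_pos dif.length with hm0 | hm1
  · -- no differences: the double loop is empty, B appends nothing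
    rw [hm0]
    simp only [Nat.zero_sub, List.range'_zero, List.foldl_nil]
    rw [List.getElem?_map]
    by_cases hin : i < x.length
    · rw [List.getElem?_range hin]
      simp only [Option.map_some]
      rw [pvPadA_eq]
      simp
    · rw [range_getElem?_none hin]
      simp
  · rw [fold_outer_get (pvDiag dif) dif.length (dif.length - 1) 1 _ i (by omega)]
    rw [List.getElem?_map]
    by_cases hin : i < x.length
    · rw [List.getElem?_range hin]
      simp only [Option.map_some]
      rw [pvPadA_eq]
      by_cases him : i < dif.length
      · have hfilter : (List.range' 1 (dif.length - 1)).filter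
            (fun j => decide (j ≤ i) && decide (i < dif.length)) = List.range' 1 i := by
          have := filter_range'_le i (fun j => decide (j ≤ i) && decide (i < dif.length))
            (fun j => by simp [him]) (dif.length - 1) 1 (by omega) (by omega)
          simpa using this
        rw [hfilter, if_pos him]
      · have hfilter : (List.range' 1 (dif.length - 1)).filter
            (fun j => decide (j ≤ i) && decide (i < dif.length)) = [] := by
          apply List.filter_eq_nil_iff.mpr
          intro j _
          simp
          omega
        rw [hfilter, if_neg him]
        simp only [List.map_nil]
    · rw [range_getElem?_none hin]
      simp
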